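-- pv_equiv track=rewrite | github.com/techyphob/python | Network/Supernetting.py | SubnetMask
-- ===== SOURCE A (Python) =====
-- def SubnetMask(ml: int):
-- #converts mask length to dotted format
--     sm = [0, 0, 0, 0]
--     if (0 <= ml < 33):
--         i = 0
--         while ml > 8:
--             sm[i] = 255
--             i = i + 1
--             ml = ml - 8
--         sm[i] = 256 - 2**(8 - ml)
--     return sm
-- ===== SOURCE B (Python) =====
-- def SubnetMask(ml: int):
--     # Closed-form: build the 32-bit mask with one shift, then extract octets.
--     full = 0
--     if 0 <= ml < 33:
--         full = (0xFFFFFFFF << (32 - ml)) & 0xFFFFFFFF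
--     return [(full >> 24) & 255, (full >> 16) & 255, (full >> 8) & 255, full & 255]
-- ===== Notes on version B (the rewrite author's own statement) =====
-- stated objective: idiomatic
-- what changed: Replaces the octet-by-octet while loop with a closed-form 32-bit bitmask ((0xFFFFFFFF << (32-ml)) & 0xFFFFFFFF) and shift/mask extraction of the four octets.
import Mathlib
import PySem

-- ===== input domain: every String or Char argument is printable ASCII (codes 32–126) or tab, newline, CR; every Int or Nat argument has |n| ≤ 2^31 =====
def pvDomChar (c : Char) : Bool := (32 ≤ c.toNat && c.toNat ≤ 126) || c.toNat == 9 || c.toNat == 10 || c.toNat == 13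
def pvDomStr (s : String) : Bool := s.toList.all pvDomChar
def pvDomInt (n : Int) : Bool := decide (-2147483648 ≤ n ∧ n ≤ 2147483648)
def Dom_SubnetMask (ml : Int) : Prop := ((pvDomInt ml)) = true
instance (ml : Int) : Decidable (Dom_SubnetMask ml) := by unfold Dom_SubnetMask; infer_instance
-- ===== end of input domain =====

-- B replaces A's octet-filling while loop by a closed-form 32-bit bitmask with shift/mask octet extraction (idiomatic, same cost).


-- ===== PORT A =====
-- the while loop: while ml > 8: sm[i] = 255; i += 1; ml -= 8
def SubnetMaskLoop (sm : List Int) (i ml : Int) : List Int × Int × Int :=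
  if h : ml > 8 then
    SubnetMaskLoop (sm.set i.toNat 255) (i + 1) (ml - 8)
  else (sm, i, ml)
termination_by ml.toNat
decreasing_by omega

def SubnetMask (ml : Int) : List Int :=
  let sm : List Int := [0, 0, 0, 0]
  if 0 ≤ ml ∧ ml < 33 then
    let (sm, i, ml) := SubnetMaskLoop sm 0 ml
    sm.set i.toNat (256 - 2 ^ (8 - ml).toNat)   -- exponent 8-ml ≥ 0 here (loop exits with ml ≤ 8)
  else sm

-- ===== PORT B =====
def SubnetMask_alt (ml : Int) : List Int :=
  let full : Int :=
    if 0 ≤ ml ∧ ml < 33 then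
      -- (0xFFFFFFFF << (32-ml)) & 0xFFFFFFFF; shift/AND exact as *2^k and mod 2^32 for nonneg values
      (4294967295 * 2 ^ (32 - ml).toNat) % 4294967296
    else 0
  -- (full >> k) & 255  =  full / 2^k % 256 (full ≥ 0)
  [full / 16777216 % 256, full / 65536 % 256, full / 256 % 256, full % 256]

-- ===== PRECONDITION & SPEC =====
def Spec_SubnetMask (ml : Int) (out : List Int) : Prop := out = SubnetMask_alt ml
instance (ml : Int) (out : List Int) : Decidable (Spec_SubnetMask ml out) := by unfold Spec_SubnetMask; infer_instance

-- ===== CLAIM (what is proved, stated in full; the proofs are below) =====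
def Claim_equal_SubnetMask : Prop := ∀ (ml : Int), Dom_SubnetMask ml → Spec_SubnetMask ml (SubnetMask ml)

-- ===== LEMMAS AND PROOFS =====
theorem SubnetMask_eq_alt_of_in_range (ml : Int) (h0 : 0 ≤ ml) (h1 : ml < 33) :
    SubnetMask ml = SubnetMask_alt ml := by
  interval_cases ml <;> simp [SubnetMask, SubnetMask_alt, SubnetMaskLoop]

theorem SubnetMask_eq_alt_of_out (ml : Int) (h : ¬ (0 ≤ ml ∧ ml < 33)) :
    SubnetMask ml = SubnetMask_alt ml := by
  simp [SubnetMask, SubnetMask_alt, h]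

-- ===== VERDICT (by name: the statement is the Claim_ definition above) =====
theorem SubnetMask_spec : Claim_equal_SubnetMask := by
  intro ml _
  unfold Spec_SubnetMask
  by_cases h : 0 ≤ ml ∧ ml < 33
  · exact SubnetMask_eq_alt_of_in_range ml h.1 h.2
  · exact SubnetMask_eq_alt_of_out ml h
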